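-- pv_equiv track=rewrite | github.com/bmh2127/pd-target-identification | src/pd_target_identification/defs/knowledge_graph/pathway_utilities.py | assess_pd_pathway_enrichment
-- ===== SOURCE A (Python) =====
-- from typing import List, Dict, Any
--
-- def assess_pd_pathway_enrichment(pathways_list: List[str]) -> bool:
--     """Assess if gene shows Parkinson's disease pathway enrichment."""
--     pd_keywords = ['parkinson', 'parkinsonian', 'alpha-synuclein', 'synuclein', 'lewy body']
--
--     if not pathways_list:
--         return False
--
--     for pathway in pathways_list:
--         pathway_lower = pathway.lower()
--         if any(keyword in pathway_lower for keyword in pd_keywords):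
--             return True
--     return False
-- ===== SOURCE B (Python) =====
-- def assess_pd_pathway_enrichment(pathways_list):
--     """Assess if gene shows Parkinson's disease pathway enrichment."""
--     pd_keywords = ['parkinson', 'parkinsonian', 'alpha-synuclein', 'synuclein', 'lewy body']
--     blob = '\n'.join(pathways_list).lower()
--     return any(keyword in blob for keyword in pd_keywords)
-- ===== Notes on version B (the rewrite author's own statement) =====
-- stated objective: simpler
-- what changed: Replaces the per-pathway loop with one newline-joined lowercased blob scanned once per keyword (safe: no keyword contains a newline).
import Mathlib
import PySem

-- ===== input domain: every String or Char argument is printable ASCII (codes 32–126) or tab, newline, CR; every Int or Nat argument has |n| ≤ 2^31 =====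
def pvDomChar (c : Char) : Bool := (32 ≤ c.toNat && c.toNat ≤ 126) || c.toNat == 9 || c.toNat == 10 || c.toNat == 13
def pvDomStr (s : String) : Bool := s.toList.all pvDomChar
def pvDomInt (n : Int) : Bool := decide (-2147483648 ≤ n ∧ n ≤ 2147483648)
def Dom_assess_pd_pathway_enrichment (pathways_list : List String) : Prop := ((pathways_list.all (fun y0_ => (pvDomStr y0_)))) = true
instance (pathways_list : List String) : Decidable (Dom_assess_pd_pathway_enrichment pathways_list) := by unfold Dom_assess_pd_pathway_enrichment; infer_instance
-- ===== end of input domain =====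

-- B replaces A's per-pathway loop by scanning one newline-joined lowercased blob once per keyword
-- (safe because no keyword contains a newline); objective: simpler.

-- ===== PORT A =====
def pvKeywordsA : List String := ["parkinson", "parkinsonian", "alpha-synuclein", "synuclein", "lewy body"]

-- the 'for pathway in pathways_list' loop with its early 'return True'
def pvLoopA : List String → Bool
  | [] => false
  | pathway :: rest =>
      let pathway_lower := PySem.Str.lower pathway
      if pvKeywordsA.any (fun keyword => PySem.Str.isIn keyword pathway_lower) then true
      else pvLoopA rest

def assess_pd_pathway_enrichment (pathways_list : List String) : Bool :=
  if pathways_list = [] then false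
  else pvLoopA pathways_list

-- ===== PORT B =====
def pvKeywordsB : List String := ["parkinson", "parkinsonian", "alpha-synuclein", "synuclein", "lewy body"]

def assess_pd_pathway_enrichment_alt (pathways_list : List String) : Bool :=
  let blob := PySem.Str.lower (PySem.Str.join "\n" pathways_list)
  pvKeywordsB.any (fun keyword => PySem.Str.isIn keyword blob)

-- ===== PRECONDITION & SPEC =====
def Spec_assess_pd_pathway_enrichment (pathways_list : List String) (out : Bool) : Prop := out = assess_pd_pathway_enrichment_alt pathways_list
instance (pathways_list : List String) (out : Bool) : Decidable (Spec_assess_pd_pathway_enrichment pathways_list out) := by unfold Spec_assess_pd_pathway_enrichment; infer_instance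

-- ===== CLAIM (what is proved, stated in full; the proofs are below) =====
def Claim_equal_assess_pd_pathway_enrichment : Prop := ∀ (pathways_list : List String), Dom_assess_pd_pathway_enrichment pathways_list → Spec_assess_pd_pathway_enrichment pathways_list (assess_pd_pathway_enrichment pathways_list)

-- ===== LEMMAS AND PROOFS =====

-- a prefix of a ++ c :: b avoiding c lies inside a
theorem pv_prefix_of_append_cons {c : Char} {kw a b : List Char} (hc : c ∉ kw)
    (h : kw <+: a ++ c :: b) : kw <+: a := by
  induction a generalizing kw with
  | nil =>
    cases kw with
    | nil => exact List.nil_prefix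
    | cons k kt =>
      rcases h with ⟨t, ht⟩
      simp at ht
      exact absurd (ht.1 ▸ List.mem_cons_self) hc
  | cons x a' ih =>
    cases kw with
    | nil => exact List.nil_prefix
    | cons k kt =>
      rcases (List.cons_prefix_cons.mp h) with ⟨hk, hrest⟩
      have : kt <+: a' := ih (fun hm => hc (List.mem_cons_of_mem _ hm)) hrest
      exact List.cons_prefix_cons.mpr ⟨hk, this⟩

-- an infix of a ++ c :: b avoiding c lies in a or in b
theorem pv_infix_of_append_cons {c : Char} {kw a b : List Char} (hc : c ∉ kw)
    (h : kw <:+: a ++ c :: b) : kw <:+: a ∨ kw <:+: b := by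
  induction a with
  | nil =>
    rcases List.infix_cons_iff.mp h with hp | hi
    · cases kw with
      | nil => exact Or.inl (List.infix_refl [])
      | cons k kt =>
        rcases List.cons_prefix_cons.mp hp with ⟨hk, _⟩
        exact absurd (hk ▸ List.mem_cons_self) hc
    · exact Or.inr hi
  | cons x a' ih =>
    rcases List.infix_cons_iff.mp h with hp | hi
    · left
      cases kw with
      | nil => exact List.nil_infix
      | cons k kt =>
        rcases List.cons_prefix_cons.mp hp with ⟨hk, hrest⟩
        have : kt <+: a' := pv_prefix_of_append_cons (fun hm => hc (List.mem_cons_of_mem _ hm)) hrest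
        exact (List.cons_prefix_cons.mpr ⟨hk, this⟩).isInfix
    · rcases ih hi with h1 | h2
      · exact Or.inl (List.infix_cons h1)
      · exact Or.inr h2

-- kw (nonempty, newline-free) is an infix of the '\n'-join iff it is an infix of some part
theorem pv_infix_join_iff {kw : List Char} (hne : kw ≠ []) (hc : '\n' ∉ kw)
    (ls : List (List Char)) :
    kw <:+: PySem.Chars.join ['\n'] ls ↔ ∃ l ∈ ls, kw <:+: l := by
  induction ls with
  | nil =>
    simp only [PySem.Chars.join_nil]
    constructor
    · intro h; exact absurd (List.infix_nil.mp h) hne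
    · rintro ⟨l, hl, _⟩; simp at hl
  | cons a rest ih =>
    cases rest with
    | nil =>
      simp [PySem.Chars.join_singleton]
    | cons b r =>
      rw [PySem.Chars.join_cons_cons]
      constructor
      · intro h
        have h' : kw <:+: a ++ '\n' :: PySem.Chars.join ['\n'] (b :: r) := by
          simpa [List.append_assoc] using h
        rcases pv_infix_of_append_cons hc h' with h1 | h2
        · exact ⟨a, by simp, h1⟩
        · rcases ih.mp h2 with ⟨l, hl, hli⟩
          exact ⟨l, by simp [hl], hli⟩
      · rintro ⟨l, hl, hli⟩
        rcases List.mem_cons.mp hl with rfl | hl'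
        · exact hli.trans ⟨[], '\n' :: PySem.Chars.join ['\n'] (b :: r), by simp⟩
        · have : kw <:+: PySem.Chars.join ['\n'] (b :: r) := ih.mpr ⟨l, hl', hli⟩
          exact this.trans ⟨a ++ ['\n'], [], by simp⟩

-- lower distributes over join
theorem pv_lower_join (sep : List Char) (ls : List (List Char)) :
    PySem.Chars.lower (PySem.Chars.join sep ls)
      = PySem.Chars.join (PySem.Chars.lower sep) (ls.map PySem.Chars.lower) := by
  induction ls with
  | nil => simp [PySem.Chars.join_nil, PySem.Chars.lower]
  | cons a rest ih =>
    cases rest with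
    | nil => simp [PySem.Chars.join_singleton]
    | cons b r =>
      rw [PySem.Chars.join_cons_cons, List.map_cons, List.map_cons, PySem.Chars.join_cons_cons,
        ← List.map_cons, ← ih]
      simp [PySem.Chars.lower]

-- A's loop is an 'any'
theorem pv_loopA_eq_any (ps : List String) :
    pvLoopA ps = ps.any (fun p => pvKeywordsA.any (fun kw => PySem.Str.isIn kw (PySem.Str.lower p))) := by
  induction ps with
  | nil => rfl
  | cons p rest ih =>
    simp only [pvLoopA, List.any_cons]
    cases hk : pvKeywordsA.any (fun keyword => PySem.Str.isIn keyword (PySem.Str.lower p)) with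
    | true => simp
    | false => simp [ih]

-- per keyword: scanning the lowered blob = scanning each lowered pathway
theorem pv_isIn_blob (kw : String) (hne : kw.toList ≠ []) (hc : '\n' ∉ kw.toList)
    (ps : List String) :
    PySem.Str.isIn kw (PySem.Str.lower (PySem.Str.join "\n" ps))
      = ps.any (fun p => PySem.Str.isIn kw (PySem.Str.lower p)) := by
  have hsep : PySem.Chars.lower "\n".toList = ['\n'] := by decide
  have hblob : (PySem.Str.lower (PySem.Str.join "\n" ps)).toList
      = PySem.Chars.join ['\n'] (ps.map (fun p => PySem.Chars.lower p.toList)) := by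
    rw [PySem.Str.toList_lower, PySem.Str.toList_join, pv_lower_join, hsep, List.map_map]
    rfl
  have key : (PySem.Str.isIn kw (PySem.Str.lower (PySem.Str.join "\n" ps)) = true)
      ↔ (ps.any (fun p => PySem.Str.isIn kw (PySem.Str.lower p)) = true) := by
    rw [PySem.Str.isIn_eq, PySem.Chars.isIn_iff_infix, hblob, pv_infix_join_iff hne hc]
    simp only [List.any_eq_true, List.mem_map]
    constructor
    · rintro ⟨l, ⟨p, hp, rfl⟩, hli⟩
      refine ⟨p, hp, ?_⟩
      rw [PySem.Str.isIn_eq, PySem.Chars.isIn_iff_infix, PySem.Str.toList_lower]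
      exact hli
    · rintro ⟨p, hp, hin⟩
      rw [PySem.Str.isIn_eq, PySem.Chars.isIn_iff_infix, PySem.Str.toList_lower] at hin
      exact ⟨PySem.Chars.lower p.toList, ⟨p, hp, rfl⟩, hin⟩
  exact Bool.eq_iff_iff.mpr key

-- swap the order of the two 'any's
theorem pv_any_swap (ps ks : List String) (f : String → String → Bool) :
    ps.any (fun p => ks.any (fun k => f k p)) = ks.any (fun k => ps.any (fun p => f k p)) := by
  refine Bool.eq_iff_iff.mpr ?_
  simp only [List.any_eq_true]
  tauto

-- congruence for 'any' under pointwise-on-members equality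
theorem pv_any_congr_mem {l : List String} {f g : String → Bool}
    (h : ∀ a ∈ l, f a = g a) : l.any f = l.any g := by
  induction l with
  | nil => rfl
  | cons a t ih =>
    simp only [List.any_cons, h a (List.mem_cons_self), ih (fun x hx => h x (List.mem_cons_of_mem _ hx))]

-- ===== VERDICT (by name: the statement is the Claim_ definition above) =====
theorem assess_pd_pathway_enrichment_spec : Claim_equal_assess_pd_pathway_enrichment := by
  intro ps _
  show assess_pd_pathway_enrichment ps = assess_pd_pathway_enrichment_alt ps
  have hB : assess_pd_pathway_enrichment_alt ps
      = ps.any (fun p => pvKeywordsB.any (fun kw => PySem.Str.isIn kw (PySem.Str.lower p))) := by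
    unfold assess_pd_pathway_enrichment_alt
    have : ∀ kw ∈ pvKeywordsB,
        PySem.Str.isIn kw (PySem.Str.lower (PySem.Str.join "\n" ps))
          = ps.any (fun p => PySem.Str.isIn kw (PySem.Str.lower p)) := by
      intro kw hkw
      fin_cases hkw <;> exact pv_isIn_blob _ (by decide) (by decide) ps
    rw [pv_any_congr_mem this]
    exact (pv_any_swap ps pvKeywordsB (fun k p => PySem.Str.isIn k (PySem.Str.lower p))).symm
  unfold assess_pd_pathway_enrichment
  split_ifs with h
  · subst h; rw [hB]; rfl
  · rw [pv_loopA_eq_any, hB]; rfl
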